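-- pv_equiv track=rewrite | github.com/gopichandblr02/python_qns | Qns_GeeksForGeeks/gfg_two_pointers.py | sum_of_two_equals_third
-- ===== SOURCE A (Python) =====
-- from typing import List
--
-- def sum_of_two_equals_third(nums: List[int]) -> bool:
--     nums.sort()
--     for i in range(len(nums)):
--         target = nums[i]
--         l, r = 0, len(nums) - 1
--         while l < r:
--             if l == i:
--                 l += 1
--                 continue
--             if r == i:
--                 r -= 1
--                 continue
--             s = nums[l] + nums[r]
--             if s == target:
--                 return True
--             if s < target:
--                 l += 1
--             else:
--                 r -= 1
--     return False
-- ===== SOURCE B (Python) =====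
-- def sum_of_two_equals_third(nums):
--     nums.sort()
--     cnt = {}
--     for x in nums:
--         cnt[x] = cnt.get(x, 0) + 1
--     n = len(nums)
--     for j in range(n):
--         for k in range(j + 1, n):
--             s = nums[j] + nums[k]
--             c = cnt.get(s, 0)
--             if nums[j] == s:
--                 c -= 1
--             if nums[k] == s:
--                 c -= 1
--             if c > 0:
--                 return True
--     return False
-- ===== Notes on version B (the rewrite author's own statement) =====
-- stated objective: alternative
-- what changed: Replaces A's per-target two-pointer sweep over the sorted list by a single counter dict built once plus a scan over index pairs (j,k) that checks in O(1) whether a third distinct index holds nums[j]+nums[k].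
import Mathlib
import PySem

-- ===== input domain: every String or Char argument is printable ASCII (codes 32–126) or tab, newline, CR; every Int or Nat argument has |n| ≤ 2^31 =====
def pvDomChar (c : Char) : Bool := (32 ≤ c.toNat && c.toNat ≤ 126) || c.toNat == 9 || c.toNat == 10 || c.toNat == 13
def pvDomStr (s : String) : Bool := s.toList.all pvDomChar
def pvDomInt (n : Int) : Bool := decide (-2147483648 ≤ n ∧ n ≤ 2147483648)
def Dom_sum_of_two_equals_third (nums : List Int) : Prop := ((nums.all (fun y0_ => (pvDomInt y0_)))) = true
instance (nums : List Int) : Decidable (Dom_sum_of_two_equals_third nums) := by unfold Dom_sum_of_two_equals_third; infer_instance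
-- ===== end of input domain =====

-- B replaces A's per-target two-pointer sweep by a sort + counter dict + pair scan that looks up
-- the needed third element in O(1); objective: alternative (same O(n^2) cost, different algorithm).
-- A sorts its argument in place (B does the same); the equivalence proved is about the return value.


-- ===== PORT A =====
-- the 'while l < r' two-pointer loop of A; terminates because r - l strictly decreases
def tpA (a : List Int) (i : Nat) (target : Int) (l r : Nat) : Bool :=
  if _h : l < r then
    if l = i then tpA a i target (l+1) r
    else if r = i then tpA a i target l (r-1)
    else
      let s := a.getD l 0 + a.getD r 0
      if s = target then true
      else if s < target then tpA a i target (l+1) r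
      else tpA a i target l (r-1)
  else false
termination_by r - l
decreasing_by all_goals omega

def sum_of_two_equals_third (nums : List Int) : Bool :=
  let a := PySem.List.sorted nums (fun x => x) false
  (List.range a.length).any (fun i => tpA a i (a.getD i 0) 0 (a.length - 1))

-- ===== PORT B =====
def sum_of_two_equals_third_alt (nums : List Int) : Bool :=
  let a := PySem.List.sorted nums (fun x => x) false
  let cnt := a.foldl (fun d x => d.insert x (d.getD x 0 + 1)) (PySem.Dict.empty : PySem.Dict Int Int)
  let n := a.length
  (List.range n).any (fun j =>
    (List.range' (j+1) (n - (j+1))).any (fun k =>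
      let s := a.getD j 0 + a.getD k 0
      let c0 := cnt.getD s 0
      let c1 := if a.getD j 0 = s then c0 - 1 else c0
      let c2 := if a.getD k 0 = s then c1 - 1 else c1
      decide (0 < c2)))

-- ===== PRECONDITION & SPEC =====
def Spec_sum_of_two_equals_third (nums : List Int) (out : Bool) : Prop := out = sum_of_two_equals_third_alt nums
instance (nums : List Int) (out : Bool) : Decidable (Spec_sum_of_two_equals_third nums out) := by unfold Spec_sum_of_two_equals_third; infer_instance

-- ===== CLAIM (what is proved, stated in full; the proofs are below) =====
def Claim_equal_sum_of_two_equals_third : Prop := ∀ (nums : List Int), Dom_sum_of_two_equals_third nums → Spec_sum_of_two_equals_third nums (sum_of_two_equals_third nums)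

-- ===== LEMMAS AND PROOFS =====

-- the common specification: some element is the sum of two elements at two other (distinct) indices
def PvP (a : List Int) : Prop :=
  ∃ i j k : Nat, i < a.length ∧ j < a.length ∧ k < a.length ∧ i ≠ j ∧ i ≠ k ∧ j < k ∧
    a.getD j 0 + a.getD k 0 = a.getD i 0

-- count as a countP over indices
lemma count_eq_countP_range (a : List Int) (s : Int) :
    a.count s = (List.range a.length).countP (fun i => a.getD i 0 == s) := by
  induction a using List.reverseRecOn with
  | nil => simp
  | append_singleton xs x ih =>
      rw [List.count_append, List.length_append, List.length_singleton, List.range_succ,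
        List.countP_append]
      have h1 : (List.range xs.length).countP (fun i => (xs ++ [x]).getD i 0 == s)
          = (List.range xs.length).countP (fun i => xs.getD i 0 == s) := by
        apply List.countP_congr
        intro i hi
        rw [List.mem_range] at hi
        rw [List.getD_append _ _ _ _ hi]
      have h2 : (xs ++ [x]).getD xs.length 0 = x := by
        rw [List.getD_eq_getElem _ _ (by simp)]
        simp
      rw [h1, ← ih, List.countP_singleton, h2]
      by_cases hxs : x = s <;> simp [hxs]

lemma countP_range_eq_card (n : Nat) (p : Nat → Prop) [DecidablePred p] :
    (List.range n).countP (fun i => decide (p i)) = ((Finset.range n).filter p).card := by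
  simp [Finset.filter, Finset.range, Multiset.range, Multiset.filter_coe,
    List.countP_eq_length_filter]

-- the key counting fact behind B's inner test
lemma exists_third (a : List Int) (j k : Nat) (hj : j < a.length) (hk : k < a.length)
    (hjk : j ≠ k) (s : Int) :
    (0 < (a.count s : Int) - (if a.getD j 0 = s then 1 else 0) - (if a.getD k 0 = s then 1 else 0))
    ↔ ∃ i : Nat, i < a.length ∧ i ≠ j ∧ i ≠ k ∧ a.getD i 0 = s := by
  classical
  set T : Finset Nat := (Finset.range a.length).filter (fun i => a.getD i 0 = s) with hT
  have hcard : a.count s = T.card := by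
    rw [count_eq_countP_range]
    have := countP_range_eq_card a.length (fun i => a.getD i 0 = s)
    simpa using this
  have hsplit : (T \ ({j, k} : Finset Nat)).card + (T ∩ ({j, k} : Finset Nat)).card = T.card :=
    Finset.card_sdiff_add_card_inter T {j, k}
  have hmemT : ∀ i, i ∈ T ↔ i < a.length ∧ a.getD i 0 = s := by
    intro i; simp [hT]
  have hinter : (T ∩ ({j, k} : Finset Nat)).card
      = (if a.getD j 0 = s then 1 else 0) + (if a.getD k 0 = s then 1 else 0) := by
    have heq : T ∩ ({j, k} : Finset Nat) = ({j, k} : Finset Nat).filter (fun i => i ∈ T) := by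
      ext i; simp [Finset.mem_filter, Finset.mem_inter, and_comm]
    rw [heq, show ({j, k} : Finset Nat) = insert j {k} from rfl, Finset.filter_insert,
        Finset.filter_singleton]
    by_cases h1 : j ∈ T <;> by_cases h2 : k ∈ T <;>
      simp_all [Finset.card_insert_of_notMem]
  have hkey : (0 < (a.count s : Int) - (if a.getD j 0 = s then 1 else 0)
      - (if a.getD k 0 = s then 1 else 0)) ↔ 0 < (T \ ({j, k} : Finset Nat)).card := by
    rw [hcard]
    split_ifs at hinter ⊢ <;> omega
  rw [hkey]
  constructor
  · intro hpos
    obtain ⟨i, hi⟩ := Finset.card_pos.mp hpos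
    refine ⟨i, ?_⟩
    simp only [Finset.mem_sdiff, hmemT, Finset.mem_insert, Finset.mem_singleton] at hi
    tauto
  · rintro ⟨i, hi1, hi2, hi3, hi4⟩
    refine Finset.card_pos.mpr ⟨i, ?_⟩
    simp only [Finset.mem_sdiff, hmemT, Finset.mem_insert, Finset.mem_singleton]
    tauto

-- sortedness of the list A and B both work on, in getD form
lemma sorted_getD_mono (nums : List Int) (p q : Nat) (hpq : p ≤ q)
    (hq : q < (PySem.List.sorted nums (fun x => x) false).length) :
    (PySem.List.sorted nums (fun x => x) false).getD p 0
      ≤ (PySem.List.sorted nums (fun x => x) false).getD q 0 := by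
  rw [List.getD_eq_getElem _ _ (Nat.lt_of_le_of_lt hpq hq), List.getD_eq_getElem _ _ hq]
  exact PySem.List.sorted_id_getElem_mono nums hpq hq

-- correctness of A's two-pointer sweep on a segment of a monotone list
lemma tpA_iff (a : List Int)
    (hmono : ∀ p q : Nat, p ≤ q → q < a.length → a.getD p 0 ≤ a.getD q 0)
    (i : Nat) (t : Int) (l r : Nat) :
    r < a.length →
    (tpA a i t l r = true ↔
      ∃ p q : Nat, l ≤ p ∧ p < q ∧ q ≤ r ∧ p ≠ i ∧ q ≠ i ∧ a.getD p 0 + a.getD q 0 = t) := by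
  fun_induction tpA a i t l r with
  | case1 r hlr ih =>
      intro hr
      rw [ih hr]
      constructor
      · rintro ⟨p, q, h1, h2, h3, h4, h5, h6⟩; exact ⟨p, q, by omega, h2, h3, h4, h5, h6⟩
      · rintro ⟨p, q, h1, h2, h3, h4, h5, h6⟩; exact ⟨p, q, by omega, h2, h3, h4, h5, h6⟩
  | case2 l hlr hli ih =>
      intro hr
      rw [ih (by omega)]
      constructor
      · rintro ⟨p, q, h1, h2, h3, h4, h5, h6⟩; exact ⟨p, q, h1, h2, by omega, h4, h5, h6⟩
      · rintro ⟨p, q, h1, h2, h3, h4, h5, h6⟩; exact ⟨p, q, h1, h2, by omega, h4, h5, h6⟩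
  | case3 l r hlr hli hri s hs =>
      intro _
      exact ⟨fun _ => ⟨l, r, le_refl l, hlr, le_refl r, hli, hri, hs⟩, fun _ => rfl⟩
  | case4 l r hlr hli hri s hne hlt ih =>
      intro hr
      rw [ih hr]
      constructor
      · rintro ⟨p, q, h1, h2, h3, h4, h5, h6⟩; exact ⟨p, q, by omega, h2, h3, h4, h5, h6⟩
      · rintro ⟨p, q, h1, h2, h3, h4, h5, h6⟩
        refine ⟨p, q, ?_, h2, h3, h4, h5, h6⟩
        rcases Nat.lt_or_ge l p with h | h
        · omega
        · exfalso
          have hpl : p = l := by omega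
          have hle : a.getD q 0 ≤ a.getD r 0 := hmono q r h3 hr
          subst hpl
          simp only [s] at hlt
          omega
  | case5 l r hlr hli hri s hne hlt ih =>
      intro hr
      rw [ih (by omega)]
      constructor
      · rintro ⟨p, q, h1, h2, h3, h4, h5, h6⟩; exact ⟨p, q, h1, h2, by omega, h4, h5, h6⟩
      · rintro ⟨p, q, h1, h2, h3, h4, h5, h6⟩
        refine ⟨p, q, h1, h2, ?_, h4, h5, h6⟩
        rcases Nat.lt_or_ge q r with h | h
        · omega
        · exfalso
          have hqr : q = r := by omega
          have hle : a.getD l 0 ≤ a.getD p 0 := hmono l p h1 (by omega)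
          subst hqr
          simp only [s, not_lt] at hlt
          omega
  | case6 l r hlr =>
      intro _
      simp only [Bool.false_eq_true, false_iff]
      rintro ⟨p, q, h1, h2, h3, _, _, _⟩
      omega

lemma A_iff (nums : List Int) :
    sum_of_two_equals_third nums = true ↔ PvP (PySem.List.sorted nums (fun x => x) false) := by
  have hmono := sorted_getD_mono nums
  set a := PySem.List.sorted nums (fun x => x) false with ha
  unfold sum_of_two_equals_third
  rw [← ha, List.any_eq_true]
  simp only [List.mem_range]
  constructor
  · rintro ⟨i, hi, htp⟩
    rw [tpA_iff a hmono i _ 0 (a.length - 1) (by omega)] at htp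
    obtain ⟨p, q, h1, h2, h3, h4, h5, h6⟩ := htp
    exact ⟨i, p, q, hi, by omega, by omega, Ne.symm h4, Ne.symm h5, h2, h6⟩
  · rintro ⟨i, j, k, hi, hj, hk, hij, hik, hjk, hsum⟩
    refine ⟨i, hi, ?_⟩
    rw [tpA_iff a hmono i _ 0 (a.length - 1) (by omega)]
    exact ⟨j, k, Nat.zero_le j, hjk, by omega, Ne.symm hij, Ne.symm hik, hsum⟩

lemma B_iff (nums : List Int) :
    sum_of_two_equals_third_alt nums = true ↔ PvP (PySem.List.sorted nums (fun x => x) false) := by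
  set a := PySem.List.sorted nums (fun x => x) false with ha
  unfold sum_of_two_equals_third_alt
  rw [← ha, List.any_eq_true]
  simp only [List.mem_range, List.any_eq_true, List.mem_range'_1, decide_eq_true_eq,
    PySem.Dict.getD_foldl_insert_add_one]
  have hcnt : ∀ v : Int, (PySem.Dict.empty : PySem.Dict Int Int).getD v 0 = 0 := fun _ => rfl
  constructor
  · rintro ⟨j, hj, k, ⟨hk1, hk2⟩, hc⟩
    have hkn : k < a.length := by omega
    rw [hcnt, zero_add] at hc
    have hex := (exists_third a j k hj hkn (by omega) (a.getD j 0 + a.getD k 0)).mp (by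
      split_ifs at hc ⊢ <;> omega)
    obtain ⟨i, hi1, hi2, hi3, hi4⟩ := hex
    exact ⟨i, j, k, hi1, hj, hkn, hi2, hi3, by omega, hi4.symm⟩
  · rintro ⟨i, j, k, hi, hj, hk, hij, hik, hjk, hsum⟩
    refine ⟨j, hj, k, ⟨by omega, by omega⟩, ?_⟩
    rw [hcnt, zero_add]
    have hex := (exists_third a j k hj hk (by omega) (a.getD j 0 + a.getD k 0)).mpr
      ⟨i, hi, hij, hik, hsum.symm⟩
    split_ifs at hex ⊢ <;> omega

-- ===== VERDICT (by name: the statement is the Claim_ definition above) =====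
theorem sum_of_two_equals_third_spec : Claim_equal_sum_of_two_equals_third := by
  intro nums _
  unfold Spec_sum_of_two_equals_third
  rw [Bool.eq_iff_iff, A_iff, B_iff]
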